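-- pv_equiv track=rewrite | github.com/Argentum462/Course-python | week5/solution25(2).py | changeValue
-- ===== SOURCE A (Python) =====
-- def changeValue(A, k, c):
--     b = 0
--     if k == 0:
--         A[c] = A[k]
--         return A
--     else:
--         b = A[k]
--         changeValue(A, k - 1, c + 1)
--         A[c] = b
--     return A
-- ===== SOURCE B (Python) =====
-- def changeValue(A, k, c):
--     vals = [A[j] for j in range(k + 1)]
--     for i in range(k, -1, -1):
--         A[c + i] = vals[k - i]
--     return A
-- ===== Notes on version B (the rewrite author's own statement) =====
-- stated objective: simpler
-- what changed: Replaces the recursion with a snapshot of A[0..k] followed by one explicit descending write loop A[c+i] = vals[k-i], preserving read-before-write order.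
import Mathlib
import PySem

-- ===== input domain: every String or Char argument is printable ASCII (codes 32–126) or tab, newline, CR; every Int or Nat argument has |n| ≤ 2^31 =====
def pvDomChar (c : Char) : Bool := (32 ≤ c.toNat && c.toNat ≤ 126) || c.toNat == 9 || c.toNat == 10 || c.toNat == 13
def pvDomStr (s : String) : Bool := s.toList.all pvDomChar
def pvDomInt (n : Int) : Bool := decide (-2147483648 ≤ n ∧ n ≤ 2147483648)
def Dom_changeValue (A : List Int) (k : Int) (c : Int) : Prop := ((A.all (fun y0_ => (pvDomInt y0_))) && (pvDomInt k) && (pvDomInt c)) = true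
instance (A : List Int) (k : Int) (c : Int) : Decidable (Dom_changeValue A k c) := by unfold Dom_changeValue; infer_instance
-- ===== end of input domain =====

-- B replaces A's recursion by a snapshot of A[0..k] plus one explicit descending
-- write loop (simpler; same cost). Both Pythons mutate A in place identically on
-- Pre_; the equivalence proved here is about the return value.

-- ===== PORT A =====
-- Literal port of A's recursion. For k < 0 Python recurses forever (RecursionError);
-- that branch is outside Pre_ and the port just returns A there to stay total.
def changeValue (A : List Int) (k : Int) (c : Int) : List Int :=
  if k = 0 then
    PySem.List.pySetD A c (PySem.List.pyGetD A k 0)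
  else if k < 0 then A
  else
    let b := PySem.List.pyGetD A k 0
    let A' := changeValue A (k - 1) (c + 1)
    PySem.List.pySetD A' c b
termination_by k.toNat
decreasing_by omega

-- ===== PORT B =====
def changeValue_alt (A : List Int) (k : Int) (c : Int) : List Int :=
  let vals := (PySem.List.pyRange 0 (k + 1) 1).map (fun j => PySem.List.pyGetD A j 0)
  (PySem.List.pyRange k (-1) (-1)).foldl
    (fun L i => PySem.List.pySetD L (c + i) (PySem.List.pyGetD vals (k - i) 0)) A

-- ===== PRECONDITION & SPEC =====
-- Exactly the inputs on which the Python A returns: k < 0 would recurse forever,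
-- a read A[k] needs k < len(A), and every written index c+i (i = 0..k) must be in
-- range -len ≤ c+i < len (negative indices wrap identically in both programs).
def Pre_changeValue (A : List Int) (k : Int) (c : Int) : Prop :=
  0 ≤ k ∧ k < (A.length : Int) ∧ -(A.length : Int) ≤ c ∧ c + k < (A.length : Int)
instance (A : List Int) (k : Int) (c : Int) : Decidable (Pre_changeValue A k c) := by
  unfold Pre_changeValue; infer_instance

def pvWitness_changeValue : List Int × Int × Int := ([5, 7, 9, 11], 2, 1)

def Spec_changeValue (A : List Int) (k : Int) (c : Int) (out : List Int) : Prop := out = changeValue_alt A k c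
instance (A : List Int) (k : Int) (c : Int) (out : List Int) : Decidable (Spec_changeValue A k c out) := by unfold Spec_changeValue; infer_instance

-- ===== CLAIM (what is proved, stated in full; the proofs are below) =====
def Claim_equal_changeValue : Prop := ∀ (A : List Int) (k : Int) (c : Int), Dom_changeValue A k c → Pre_changeValue A k c → Spec_changeValue A k c (changeValue A k c)

-- ===== LEMMAS AND PROOFS =====

-- B's loop, normalised: fold over List.range (n+1), writing A[j] to position c+(n-j).
lemma changeValue_alt_norm (n : Nat) (A : List Int) (c : Int) :
    changeValue_alt A (n : Int) c =
      (List.range (n + 1)).foldl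
        (fun (L : List Int) (j : Nat) => PySem.List.pySetD L (c + ((n : Int) - (j : Int))) (PySem.List.pyGetD A (j : Int) 0)) A := by
  unfold changeValue_alt
  rw [PySem.List.pyRange_neg_one]
  have hlen : ((n : Int) - (-1)).toNat = n + 1 := by omega
  rw [hlen, List.foldl_map]
  apply PySem.List.foldl_congr_mem
  intro L j hj
  have hj' : j < n + 1 := List.mem_range.mp hj
  have h1 : (n : Int) - ((n : Int) - (j : Int)) = (j : Int) := by ring
  rw [h1, PySem.List.pyGetD_map_pyRange_of_nonneg _ _ _ _ (by omega) (by omega)]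

lemma changeValue_eq_alt (n : Nat) (A : List Int) (c : Int) :
    changeValue A (n : Int) c = changeValue_alt A (n : Int) c := by
  induction n generalizing c with
  | zero =>
      rw [changeValue_alt_norm]
      simp [changeValue, PySem.List.pyGetD, PySem.List.pyGet?]
  | succ n ih =>
      rw [changeValue_alt_norm]
      rw [List.range_succ, List.foldl_append]
      have hne : ((n : Int) + 1) ≠ 0 := by omega
      have hnlt : ¬ ((n : Int) + 1) < 0 := by omega
      rw [show ((n + 1 : Nat) : Int) = (n : Int) + 1 by push_cast; ring]
      unfold changeValue
      simp only [hne, hnlt, if_false]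
      have hk1 : (n : Int) + 1 - 1 = (n : Int) := by ring
      rw [hk1, ih (c + 1), changeValue_alt_norm]
      simp only [List.foldl_cons, List.foldl_nil]
      congr 1
      · apply PySem.List.foldl_congr_mem
        intro L j hj
        congr 1
        ring
      · push_cast
        ring

-- ===== VERDICT (by name: the statement is the Claim_ definition above) =====
theorem changeValue_spec : Claim_equal_changeValue := by
  intro A k c _ hpre
  obtain ⟨hk, -, -, -⟩ := hpre
  unfold Spec_changeValue
  have h := changeValue_eq_alt k.toNat A c
  rwa [Int.toNat_of_nonneg hk] at h
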